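-- pv_equiv track=rewrite | github.com/XieResearchGroup/PLANS | src/evaluation/metrics_from_log.py | classwise_hits_count_one_result
-- ===== SOURCE A (Python) =====
-- def classwise_hits_count_one_result(result, classes=32):
--     r""" Count the correct, incorrect and missed predictions.
--     result (list): list of (prediction, truth) pairs
--     classes (int): number of classes
--     =======================================================================
--     return (list, list, list): number of correct, incorrect, and missed
--         counts.
--     """
--     corrects = [0] * classes
--     incorrects = [0] * classes
--     missed = [0] * classes
--     for pred, truth in result:
--         if pred == truth:
--             corrects[truth] += 1
--         else:
--             incorrects[pred] += 1
--             missed[truth] += 1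
--     return corrects, incorrects, missed
-- ===== SOURCE B (Python) =====
-- def classwise_hits_count_one_result(result, classes=32):
--     r""" Count the correct, incorrect and missed predictions.
--     Different decomposition: one loop tallies per-class prediction and truth
--     totals plus corrects; incorrects and missed fall out by subtraction.
--     """
--     pred_total = [0] * classes
--     truth_total = [0] * classes
--     corrects = [0] * classes
--     for pred, truth in result:
--         pred_total[pred] += 1
--         truth_total[truth] += 1
--         if pred == truth:
--             corrects[truth] += 1
--     incorrects = [p - c for p, c in zip(pred_total, corrects)]
--     missed = [t - c for t, c in zip(truth_total, corrects)]
--     return corrects, incorrects, missed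
-- ===== Notes on version B (the rewrite author's own statement) =====
-- stated objective: alternative
-- what changed: Instead of branching per pair into three counters, B tallies per-class prediction totals and truth totals unconditionally in one loop (plus corrects on a hit) and derives incorrects and missed afterwards by pointwise subtraction.
import Mathlib
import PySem

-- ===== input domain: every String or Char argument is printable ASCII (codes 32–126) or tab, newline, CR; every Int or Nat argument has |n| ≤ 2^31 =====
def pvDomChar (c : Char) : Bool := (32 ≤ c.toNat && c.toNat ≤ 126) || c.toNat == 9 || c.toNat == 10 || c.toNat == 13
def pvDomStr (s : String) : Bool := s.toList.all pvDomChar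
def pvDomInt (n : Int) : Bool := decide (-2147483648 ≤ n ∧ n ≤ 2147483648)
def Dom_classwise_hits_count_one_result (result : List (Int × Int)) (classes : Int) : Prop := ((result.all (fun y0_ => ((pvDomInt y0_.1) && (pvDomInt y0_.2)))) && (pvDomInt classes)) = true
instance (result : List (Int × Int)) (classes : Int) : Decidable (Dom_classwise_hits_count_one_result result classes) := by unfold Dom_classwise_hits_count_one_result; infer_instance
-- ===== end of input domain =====

-- B changes the decomposition (one unconditional tally loop + final subtractions), same cost; equivalence proved on the non-raising inputs (Pre_).

-- ===== PORT A =====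
-- loop body of A: branch on pred == truth, bump one of corrects / (incorrects and missed)
def stepA (st : List Int × List Int × List Int) (q : Int × Int) : List Int × List Int × List Int :=
  if q.1 == q.2 then
    (PySem.List.pySetD st.1 q.2 (PySem.List.pyGetD st.1 q.2 0 + 1), st.2.1, st.2.2)
  else
    (st.1,
     PySem.List.pySetD st.2.1 q.1 (PySem.List.pyGetD st.2.1 q.1 0 + 1),
     PySem.List.pySetD st.2.2 q.2 (PySem.List.pyGetD st.2.2 q.2 0 + 1))

def classwise_hits_count_one_result (result : List (Int × Int)) (classes : Int) : List Int × List Int × List Int :=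
  let corrects : List Int := List.replicate classes.toNat 0
  let incorrects : List Int := List.replicate classes.toNat 0
  let missed : List Int := List.replicate classes.toNat 0
  result.foldl stepA (corrects, incorrects, missed)

-- ===== PORT B =====
-- loop body of B: bump pred_total and truth_total unconditionally, corrects on a hit
def stepB (st : List Int × List Int × List Int) (q : Int × Int) : List Int × List Int × List Int :=
  (PySem.List.pySetD st.1 q.1 (PySem.List.pyGetD st.1 q.1 0 + 1),
   PySem.List.pySetD st.2.1 q.2 (PySem.List.pyGetD st.2.1 q.2 0 + 1),
   if q.1 == q.2 then PySem.List.pySetD st.2.2 q.2 (PySem.List.pyGetD st.2.2 q.2 0 + 1) else st.2.2)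

def classwise_hits_count_one_result_alt (result : List (Int × Int)) (classes : Int) : List Int × List Int × List Int :=
  let z : List Int := List.replicate classes.toNat 0
  let s := result.foldl stepB (z, z, z)
  (s.2.2, List.zipWith (fun p c => p - c) s.1 s.2.2, List.zipWith (fun t c => t - c) s.2.1 s.2.2)

-- ===== PRECONDITION & SPEC =====
-- Pre_ excludes exactly the inputs where Python A raises IndexError: some pair indexes outside the length-max(classes,0) lists.
def Pre_classwise_hits_count_one_result (result : List (Int × Int)) (classes : Int) : Prop :=
  ∀ q ∈ result, PySem.Raise.InRange classes.toNat q.1 ∧ PySem.Raise.InRange classes.toNat q.2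
instance (result : List (Int × Int)) (classes : Int) : Decidable (Pre_classwise_hits_count_one_result result classes) := by unfold Pre_classwise_hits_count_one_result; infer_instance

def pvWitness_classwise_hits_count_one_result : (List (Int × Int)) × Int := ([(0, 0), (1, 0), (-1, 2)], 3)

def Spec_classwise_hits_count_one_result (result : List (Int × Int)) (classes : Int) (out : List Int × List Int × List Int) : Prop := out = classwise_hits_count_one_result_alt result classes
instance (result : List (Int × Int)) (classes : Int) (out : List Int × List Int × List Int) : Decidable (Spec_classwise_hits_count_one_result result classes out) := by unfold Spec_classwise_hits_count_one_result; infer_instance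

-- ===== CLAIM (what is proved, stated in full; the proofs are below) =====
def Claim_equal_classwise_hits_count_one_result : Prop := ∀ (result : List (Int × Int)) (classes : Int), Dom_classwise_hits_count_one_result result classes → Pre_classwise_hits_count_one_result result classes → Spec_classwise_hits_count_one_result result classes (classwise_hits_count_one_result result classes)

-- ===== LEMMAS AND PROOFS =====

-- normalised (wrapped) index, matching PySem.List.pyIdx? on in-range indices
def nidx (L : Nat) (i : Int) : Nat := if 0 ≤ i then i.toNat else L - (-i).toNat

theorem nidx_lt {L : Nat} {i : Int} (h : PySem.Raise.InRange L i) : nidx L i < L := by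
  obtain ⟨h1, h2⟩ := h
  unfold nidx; split <;> omega

theorem pyIdx?_eq_nidx {L : Nat} {i : Int} (h : PySem.Raise.InRange L i) :
    PySem.List.pyIdx? L i = some (nidx L i) := by
  obtain ⟨h1, h2⟩ := h
  simp only [PySem.List.pyIdx?, nidx]
  split <;> simp

theorem pySetD_nidx {xs : List Int} {i : Int} (v : Int) (h : PySem.Raise.InRange xs.length i) :
    PySem.List.pySetD xs i v = xs.set (nidx xs.length i) v := by
  simp [PySem.List.pySetD, PySem.List.pySet?, pyIdx?_eq_nidx h]

theorem pyGetD_nidx {xs : List Int} {i : Int} (d : Int) (h : PySem.Raise.InRange xs.length i) :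
    PySem.List.pyGetD xs i d = xs.getD (nidx xs.length i) d := by
  simp [PySem.List.pyGetD, PySem.List.pyGet?, pyIdx?_eq_nidx h, List.getD]

-- bumping slot n of the left summand under a pointwise sum
theorem zip_bump_left (a b : List Int) (n : Nat) (hb : b.length = a.length) (hn : n < a.length) :
    (List.zipWith (· + ·) a b).set n ((List.zipWith (· + ·) a b).getD n 0 + 1)
      = List.zipWith (· + ·) (a.set n (a.getD n 0 + 1)) b := by
  induction a generalizing b n with
  | nil => simp at hn
  | cons x xs ih =>
    cases b with
    | nil => simp at hb
    | cons y ys =>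
      cases n with
      | zero => simp only [List.zipWith_cons_cons, List.getD_cons_zero, List.set_cons_zero]; congr 1; omega
      | succ n =>
        simp only [List.zipWith_cons_cons, List.getD_cons_succ, List.set_cons_succ]
        congr 1
        exact ih ys n (by simpa using hb) (by simpa using hn)

-- bumping slot n of the right summand under a pointwise sum
theorem zip_bump_right (a b : List Int) (n : Nat) (hb : b.length = a.length) (hn : n < a.length) :
    (List.zipWith (· + ·) a b).set n ((List.zipWith (· + ·) a b).getD n 0 + 1)
      = List.zipWith (· + ·) a (b.set n (b.getD n 0 + 1)) := by
  induction a generalizing b n with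
  | nil => simp at hn
  | cons x xs ih =>
    cases b with
    | nil => simp at hb
    | cons y ys =>
      cases n with
      | zero => simp only [List.zipWith_cons_cons, List.getD_cons_zero, List.set_cons_zero]; congr 1; omega
      | succ n =>
        simp only [List.zipWith_cons_cons, List.getD_cons_succ, List.set_cons_succ]
        congr 1
        exact ih ys n (by simpa using hb) (by simpa using hn)

-- final passes of B: pointwise (total − corrects) recovers the other counter
theorem zip_cancel (a b : List Int) (hb : b.length = a.length) :
    List.zipWith (fun p c => p - c) (List.zipWith (· + ·) a b) a = b := by
  induction a generalizing b with
  | nil =>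
    cases b with
    | nil => rfl
    | cons y ys => simp at hb
  | cons x xs ih =>
    cases b with
    | nil => simp at hb
    | cons y ys =>
      simp only [List.zipWith_cons_cons]
      congr 1
      · omega
      · exact ih ys (by simpa using hb)

theorem stepA_lengths (st : List Int × List Int × List Int) (q : Int × Int) :
    (stepA st q).1.length = st.1.length ∧ (stepA st q).2.1.length = st.2.1.length ∧
    (stepA st q).2.2.length = st.2.2.length := by
  unfold stepA; split <;> simp [PySem.List.length_pySetD]

theorem foldA_lengths (r : List (Int × Int)) (c i m : List Int) :
    (r.foldl stepA (c, i, m)).1.length = c.length ∧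
    (r.foldl stepA (c, i, m)).2.1.length = i.length ∧
    (r.foldl stepA (c, i, m)).2.2.length = m.length := by
  induction r generalizing c i m with
  | nil => simp
  | cons q r ih =>
    obtain ⟨h1, h2, h3⟩ := stepA_lengths (c, i, m) q
    obtain ⟨g1, g2, g3⟩ := ih (stepA (c, i, m) q).1 (stepA (c, i, m) q).2.1 (stepA (c, i, m) q).2.2
    simp only [List.foldl_cons]
    exact ⟨by rw [← h1]; exact g1, by rw [← h2]; exact g2, by rw [← h3]; exact g3⟩

theorem main_inv (r : List (Int × Int)) (c i m : List Int)
    (hi : i.length = c.length) (hm : m.length = c.length)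
    (hpre : ∀ q ∈ r, PySem.Raise.InRange c.length q.1 ∧ PySem.Raise.InRange c.length q.2) :
    r.foldl stepB (List.zipWith (· + ·) c i, List.zipWith (· + ·) c m, c)
      = (List.zipWith (· + ·) (r.foldl stepA (c, i, m)).1 (r.foldl stepA (c, i, m)).2.1,
         List.zipWith (· + ·) (r.foldl stepA (c, i, m)).1 (r.foldl stepA (c, i, m)).2.2,
         (r.foldl stepA (c, i, m)).1) := by
  induction r generalizing c i m with
  | nil => simp
  | cons q r ih =>
    obtain ⟨hp, ht⟩ := hpre q (List.mem_cons_self ..)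
    have hlzi : (List.zipWith (· + ·) c i).length = c.length := by simp [hi]
    have hlzm : (List.zipWith (· + ·) c m).length = c.length := by simp [hm]
    have hnp := nidx_lt hp
    have hnt := nidx_lt ht
    simp only [List.foldl_cons]
    by_cases hq : q.1 = q.2
    · have hstepB : stepB (List.zipWith (· + ·) c i, List.zipWith (· + ·) c m, c) q
          = (List.zipWith (· + ·) (c.set (nidx c.length q.2) (c.getD (nidx c.length q.2) 0 + 1)) i,
             List.zipWith (· + ·) (c.set (nidx c.length q.2) (c.getD (nidx c.length q.2) 0 + 1)) m,
             c.set (nidx c.length q.2) (c.getD (nidx c.length q.2) 0 + 1)) := by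
        simp only [stepB, hq, beq_self_eq_true, if_pos]
        rw [pySetD_nidx _ (by rw [hlzi]; exact hq ▸ hp), pyGetD_nidx _ (by rw [hlzi]; exact hq ▸ hp),
            pySetD_nidx _ (by rw [hlzm]; exact ht), pyGetD_nidx _ (by rw [hlzm]; exact ht),
            pySetD_nidx _ ht, pyGetD_nidx _ ht]
        rw [hlzi, hlzm]
        rw [zip_bump_left c i _ hi hnt, zip_bump_left c m _ hm hnt]
      have hstepA : stepA (c, i, m) q
          = (c.set (nidx c.length q.2) (c.getD (nidx c.length q.2) 0 + 1), i, m) := by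
        simp only [stepA, hq, beq_self_eq_true, if_pos]
        rw [pySetD_nidx _ ht, pyGetD_nidx _ ht]
      rw [hstepB, hstepA]
      exact ih _ i m (by simp [hi]) (by simp [hm])
        (fun p hpm => by simpa using hpre p (List.mem_cons_of_mem _ hpm))
    · have hne : (q.1 == q.2) = false := by simp [hq]
      have hstepB : stepB (List.zipWith (· + ·) c i, List.zipWith (· + ·) c m, c) q
          = (List.zipWith (· + ·) c (i.set (nidx c.length q.1) (i.getD (nidx c.length q.1) 0 + 1)),
             List.zipWith (· + ·) c (m.set (nidx c.length q.2) (m.getD (nidx c.length q.2) 0 + 1)),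
             c) := by
        simp only [stepB, hne, if_neg, Bool.false_eq_true, not_false_iff]
        rw [pySetD_nidx _ (by rw [hlzi]; exact hp), pyGetD_nidx _ (by rw [hlzi]; exact hp),
            pySetD_nidx _ (by rw [hlzm]; exact ht), pyGetD_nidx _ (by rw [hlzm]; exact ht)]
        rw [hlzi, hlzm]
        rw [zip_bump_right c i _ hi hnp, zip_bump_right c m _ hm hnt]
      have hstepA : stepA (c, i, m) q
          = (c, i.set (nidx c.length q.1) (i.getD (nidx c.length q.1) 0 + 1),
             m.set (nidx c.length q.2) (m.getD (nidx c.length q.2) 0 + 1)) := by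
        simp only [stepA, hne, if_neg, Bool.false_eq_true, not_false_iff]
        rw [pySetD_nidx _ (hi ▸ hp), pyGetD_nidx _ (hi ▸ hp),
            pySetD_nidx _ (hm ▸ ht), pyGetD_nidx _ (hm ▸ ht)]
        rw [hi, hm]
      rw [hstepB, hstepA]
      exact ih c _ _ (by simp [hi]) (by simp [hm])
        (fun p hpm => hpre p (List.mem_cons_of_mem _ hpm))

-- ===== VERDICT (by name: the statement is the Claim_ definition above) =====
theorem classwise_hits_count_one_result_spec : Claim_equal_classwise_hits_count_one_result := by
  intro result classes _ hpre
  unfold Spec_classwise_hits_count_one_result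
  unfold classwise_hits_count_one_result classwise_hits_count_one_result_alt
  simp only []
  set z : List Int := List.replicate classes.toNat 0 with hz
  have hzlen : z.length = classes.toNat := by simp [hz]
  have hzz : List.zipWith (· + ·) z z = z := by
    simp [hz]
  have hpre' : ∀ q ∈ result, PySem.Raise.InRange z.length q.1 ∧ PySem.Raise.InRange z.length q.2 := by
    rw [hzlen]; exact hpre
  have hmain := main_inv result z z z rfl rfl hpre'
  rw [hzz] at hmain
  rw [hmain]
  obtain ⟨hc, hi, hm⟩ := foldA_lengths result z z z
  rw [zip_cancel _ _ (hi.trans hc.symm), zip_cancel _ _ (hm.trans hc.symm)]
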